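-- pv_equiv track=rewrite | github.com/jmrCalvo/Python2 | third practice/module.py | problema3
-- ===== SOURCE A (Python) =====
-- def factors(n):
--     x=[]
--     while n>0:
--         aux=n % 10;
--         n=n//10
--         x.append(aux)
--     return x
--
-- def problema3(n):
--     lista=factors(n)
--     suma1=0
--     suma2=1
--     for elem in lista:
--         suma1=suma1+elem
--     for elem in lista:
--         suma2=suma2*elem
--
--     if suma1>suma2:
--         return True
--     else:
--         return False
-- ===== SOURCE B (Python) =====
-- def problema3(n):
--     s = 0
--     p = 1
--     while n > 0:
--         d = n % 10
--         s += d
--         p *= d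
--         n //= 10
--     return s > p
-- ===== Notes on version B (the rewrite author's own statement) =====
-- stated objective: simpler
-- what changed: Replaced the helper that materialises the digit list plus two separate scans (sum loop, product loop) by a single while loop that maintains both running sum and product directly, no list and no helper.
import Mathlib
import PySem

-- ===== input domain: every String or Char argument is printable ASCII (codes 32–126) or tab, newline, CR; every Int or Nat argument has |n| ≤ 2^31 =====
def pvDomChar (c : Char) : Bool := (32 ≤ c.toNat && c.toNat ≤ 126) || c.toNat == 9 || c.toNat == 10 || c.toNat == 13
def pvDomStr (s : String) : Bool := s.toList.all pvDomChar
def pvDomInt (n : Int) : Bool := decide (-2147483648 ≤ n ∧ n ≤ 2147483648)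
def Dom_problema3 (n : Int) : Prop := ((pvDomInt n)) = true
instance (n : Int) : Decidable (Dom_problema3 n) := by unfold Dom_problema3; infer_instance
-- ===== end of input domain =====

-- Header: B fuses A's digit-list construction and its two separate scans into one
-- while loop maintaining the running sum and product; objective: simpler.


-- ===== PORT A =====
-- while n>0: append n%10; n//=10   (accumulator = the list x, appended at the back)
def factorsLoop (x : List Int) (n : Int) : List Int :=
  if h : n > 0 then
    factorsLoop (x ++ [PySem.Int.mod n 10]) (PySem.Int.floordiv n 10)
  else x
termination_by n.toNat
decreasing_by
  have h10 : (0:Int) < 10 := by omega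
  rw [PySem.Int.floordiv_eq_ediv_of_pos h10]
  omega

def factors (n : Int) : List Int := factorsLoop [] n

def problema3 (n : Int) : Bool :=
  let lista := factors n
  let suma1 := lista.foldl (fun acc elem => acc + elem) 0
  let suma2 := lista.foldl (fun acc elem => acc * elem) 1
  if suma1 > suma2 then true else false

-- ===== PORT B =====
-- single while loop over the digits, carrying (s, p)
def altLoop (s p n : Int) : Int × Int :=
  if h : n > 0 then
    altLoop (s + PySem.Int.mod n 10) (p * PySem.Int.mod n 10) (PySem.Int.floordiv n 10)
  else (s, p)
termination_by n.toNat
decreasing_by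
  have h10 : (0:Int) < 10 := by omega
  rw [PySem.Int.floordiv_eq_ediv_of_pos h10]
  omega

def problema3_alt (n : Int) : Bool :=
  let sp := altLoop 0 1 n
  decide (sp.1 > sp.2)

-- ===== PRECONDITION & SPEC =====
def Spec_problema3 (n : Int) (out : Bool) : Prop := out = problema3_alt n
instance (n : Int) (out : Bool) : Decidable (Spec_problema3 n out) := by unfold Spec_problema3; infer_instance

-- ===== CLAIM (what is proved, stated in full; the proofs are below) =====
def Claim_equal_problema3 : Prop := ∀ (n : Int), Dom_problema3 n → Spec_problema3 n (problema3 n)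

-- ===== LEMMAS AND PROOFS =====

-- A's list accumulator is just a prefix carried along
theorem factorsLoop_eq (x : List Int) (n : Int) :
    factorsLoop x n = x ++ factorsLoop [] n := by
  by_cases h : n > 0
  · have l1 : factorsLoop x n
        = factorsLoop (x ++ [PySem.Int.mod n 10]) (PySem.Int.floordiv n 10) := by
      rw [factorsLoop]; simp [h]
    have l2 : factorsLoop ([] : List Int) n
        = [PySem.Int.mod n 10] ++ factorsLoop [] (PySem.Int.floordiv n 10) := by
      conv_lhs => rw [factorsLoop]
      simp only [h, dite_true, List.nil_append]
      exact factorsLoop_eq [PySem.Int.mod n 10] (PySem.Int.floordiv n 10)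
    rw [l1, factorsLoop_eq (x ++ [PySem.Int.mod n 10]) (PySem.Int.floordiv n 10), l2]
    simp
  · have l0 : factorsLoop ([] : List Int) n = [] := by rw [factorsLoop]; simp [h]
    rw [factorsLoop, l0]
    simp [h]
termination_by n.toNat
decreasing_by
  all_goals
    have h10 : (0:Int) < 10 := by omega
    rw [PySem.Int.floordiv_eq_ediv_of_pos h10]
    omega

-- B's fused loop computes the sum and product of A's digit list
theorem altLoop_eq (s p n : Int) :
    altLoop s p n =
      ((factors n).foldl (fun acc elem => acc + elem) s,
       (factors n).foldl (fun acc elem => acc * elem) p) := by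
  induction s, p, n using altLoop.induct with
  | case1 s p n h ih =>
    rw [altLoop]
    simp only [h, dite_true]
    rw [ih]
    have : factors n = PySem.Int.mod n 10 :: factors (PySem.Int.floordiv n 10) := by
      rw [factors, factorsLoop]
      simp only [h, dite_true, List.nil_append]
      exact factorsLoop_eq _ _
    rw [this]
    simp
  | case2 s p n h =>
    rw [altLoop, factors, factorsLoop]
    simp [h]

theorem problema3_eq_alt (n : Int) : problema3 n = problema3_alt n := by
  simp only [problema3, problema3_alt, altLoop_eq]
  split_ifs with h <;> simp [h]

-- ===== VERDICT (by name: the statement is the Claim_ definition above) =====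
theorem problema3_spec : Claim_equal_problema3 := by
  intro n _
  unfold Spec_problema3
  exact problema3_eq_alt n
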